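-- pv_equiv track=rewrite | github.com/ilariatorre/PRET | app/computeAgreement.py | createAllComb
-- ===== SOURCE A (Python) =====
-- def createAllComb(words):
--     #creo tutte le possibili coppie di concetti automatici
--     all_combs=[]
--     for term in words:
--         for i in range(len(words)):
--             if term != words[i]:
--                 combination = term+"-"+words[i]
--                 combination_inv = words[i]+"-"+term
--                 if combination_inv not in all_combs:
--                     all_combs.append(combination)
--     return all_combs
-- ===== SOURCE B (Python) =====
-- def createAllComb(words):
--     # Precompute the index of each distinct word's first occurrence, then emit
--     # term-words[i] exactly when term's value first appears before words[i]'s.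
--     first = {}
--     for idx, w in enumerate(words):
--         first.setdefault(w, idx)
--     return [t + "-" + w for t in words for w in words
--             if t != w and first[t] < first[w]]
-- ===== Notes on version B (the rewrite author's own statement) =====
-- stated objective: faster
-- what changed: The growing-list membership scan over accumulated combination strings is replaced by a precomputed first-occurrence-index table: a pair is emitted iff the term's value first occurs before the partner's, an O(1) index comparison, so the output is built by a plain comprehension with no accumulator consulted.
-- outside the precondition, e.g. on createAllComb(['', '', '-']): A returns ['--'], B returns ['--', '--']
import Mathlib
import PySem

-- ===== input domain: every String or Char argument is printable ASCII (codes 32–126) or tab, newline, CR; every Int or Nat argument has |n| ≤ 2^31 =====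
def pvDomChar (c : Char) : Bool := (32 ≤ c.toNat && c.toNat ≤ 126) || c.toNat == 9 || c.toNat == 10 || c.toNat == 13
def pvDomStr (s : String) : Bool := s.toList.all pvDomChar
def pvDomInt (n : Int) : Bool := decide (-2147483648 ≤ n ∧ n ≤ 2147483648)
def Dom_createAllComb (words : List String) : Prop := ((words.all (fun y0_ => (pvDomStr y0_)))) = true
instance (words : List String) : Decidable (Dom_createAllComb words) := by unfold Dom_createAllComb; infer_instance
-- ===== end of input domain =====

-- B replaces A's membership scan over the accumulated result list by a precomputed
-- first-occurrence-index table (emit term-w iff term's value first occurs before w's): faster.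


-- ===== PORT A =====
def createAllComb (words : List String) : List String :=
  words.foldl
    (fun all_combs term =>
      (PySem.List.pyRange 0 (words.length : Int) 1).foldl
        (fun acc i =>
          -- words[i]: i ranges over range(len(words)), always in range, so the
          -- default of pyGetD is never used
          let wi := PySem.List.pyGetD words i ""
          if term ≠ wi then
            let combination := term ++ "-" ++ wi
            let combination_inv := wi ++ "-" ++ term
            if combination_inv ∈ acc then acc else acc ++ [combination]
          else acc)
        all_combs)
    []

-- ===== PORT B =====
def createAllComb_alt (words : List String) : List String :=
  let first : PySem.Dict String Int :=
    (PySem.List.enumerate words 0).foldl (fun d p => d.setdefault p.2 p.1) PySem.Dict.empty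
  -- first[t] / first[w]: every t, w ∈ words is a key of `first`, so the default is never used
  words.flatMap (fun t =>
    (words.filter (fun w => t != w && decide (first.getD t 0 < first.getD w 0))).map
      (fun w => t ++ "-" ++ w))

-- ===== PRECONDITION & SPEC =====
-- Pre_ excludes lists on which the flat "x-y" encoding is ambiguous (possible only when
-- words themselves contain '-'): there A's string membership test can conflate a
-- combination with one built from a different pair of words, an accident of the encoding.
def Pre_createAllComb (words : List String) : Prop :=
  ∀ t ∈ words, ∀ w ∈ words, ∀ u ∈ words, ∀ v ∈ words,
    t ++ "-" ++ w = u ++ "-" ++ v → t = u ∧ w = v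
instance (words : List String) : Decidable (Pre_createAllComb words) := by
  unfold Pre_createAllComb; infer_instance
def pvWitness_createAllComb : List String := ["b", "a", "b", "c"]

def Spec_createAllComb (words : List String) (out : List String) : Prop := out = createAllComb_alt words
instance (words : List String) (out : List String) : Decidable (Spec_createAllComb words out) := by unfold Spec_createAllComb; infer_instance

-- ===== CLAIM (what is proved, stated in full; the proofs are below) =====
def Claim_equal_createAllComb : Prop := ∀ (words : List String), Dom_createAllComb words → Pre_createAllComb words → Spec_createAllComb words (createAllComb words)

-- ===== LEMMAS AND PROOFS =====

-- the condition B decides with its table, phrased via List.idxOf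
def pvCond (words : List String) (t w : String) : Bool :=
  t != w && decide (words.idxOf t < words.idxOf w)

-- the value of A's accumulator after the outer loop has processed the terms in `done`
def pvOut (words done : List String) : List String :=
  done.flatMap (fun t =>
    (words.filter (pvCond words t)).map (fun w => t ++ "-" ++ w))

-- membership in the partial output
theorem pvMem_out (words done : List String) (y x : String)
    (hinj : ∀ t ∈ words, ∀ w ∈ words, ∀ u ∈ words, ∀ v ∈ words,
      t ++ "-" ++ w = u ++ "-" ++ v → t = u ∧ w = v)
    (hy : y ∈ words) (hx : x ∈ words) (hdone : ∀ s ∈ done, s ∈ words) :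
    (y ++ "-" ++ x ∈ pvOut words done) ↔ (y ∈ done ∧ x ∈ words ∧ pvCond words y x = true) := by
  unfold pvOut
  simp only [List.mem_flatMap, List.mem_map, List.mem_filter]
  constructor
  · rintro ⟨t, ht, w, ⟨hw, hc⟩, henc⟩
    obtain ⟨rfl, rfl⟩ := hinj t (hdone t ht) w hw y hy x hx henc
    exact ⟨ht, hw, hc⟩
  · rintro ⟨hy', hx', hc⟩
    exact ⟨y, hy', x, ⟨hx', hc⟩, rfl⟩

-- the dict built by B: its lookups are first-occurrence indices
theorem pvFold_setdefault_get :
    ∀ (l : List String) (s : Int) (d : PySem.Dict String Int) (x : String),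
      ((PySem.List.enumerate l s).foldl (fun d p => d.setdefault p.2 p.1) d).get? x =
        match d.get? x with
        | some v => some v
        | none => (l.idxOf? x).map (fun j => s + (j : Int)) := by
  intro l
  induction l with
  | nil => intro s d x; cases h : d.get? x <;> simp [PySem.List.enumerate_nil, h]
  | cons a tl ih =>
    intro s d x
    rw [PySem.List.enumerate_cons, List.foldl_cons, ih]
    by_cases hxa : x = a
    · subst hxa
      rw [PySem.Dict.get?_setdefault_self]
      cases h : d.get? x <;> simp [List.idxOf?_cons]
    · rw [PySem.Dict.get?_setdefault_of_ne _ _ hxa]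
      cases h : d.get? x
      · simp only [List.idxOf?_cons, beq_iff_eq]
        rw [if_neg (fun he => hxa he.symm)]
        cases List.idxOf? x tl <;> simp
        omega
      · simp

theorem pvFirst_getD (words : List String) (x : String) (hx : x ∈ words) :
    ((PySem.List.enumerate words 0).foldl (fun d p => d.setdefault p.2 p.1)
      (PySem.Dict.empty : PySem.Dict String Int)).getD x 0 = (words.idxOf x : Int) := by
  rw [PySem.Dict.getD_eq_get?_getD, pvFold_setdefault_get, PySem.Dict.get?_empty]
  have hj : words.idxOf? x = some (words.idxOf x) := by
    rw [List.idxOf_eq_getD_idxOf?]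
    cases hj : List.idxOf? x words
    · exact absurd hx (List.idxOf?_eq_none_iff.mp hj)
    · rfl
  simp [hj]

-- B computes pvOut over the whole list
theorem pvAlt_eq_out (words : List String) :
    createAllComb_alt words = pvOut words words := by
  unfold createAllComb_alt pvOut
  apply List.flatMap_congr
  intro t ht
  congr 1
  apply List.filter_congr
  intro w hwm
  unfold pvCond
  rw [pvFirst_getD words t ht, pvFirst_getD words w hwm]
  by_cases hne : t = w <;> simp [hne]

-- distinct members have distinct first-occurrence indices
theorem pvIdxOf_ne (words : List String) (t w : String) (ht : t ∈ words) (hw : w ∈ words)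
    (hne : t ≠ w) : words.idxOf t ≠ words.idxOf w := by
  intro h
  have hlt := List.idxOf_lt_length_of_mem ht
  have h1 := List.getElem_idxOf (x := t) (xs := words) hlt
  have h2 := List.getElem_idxOf (x := w) (xs := words) (List.idxOf_lt_length_of_mem hw)
  apply hne
  calc t = words[words.idxOf t] := h1.symm
    _ = words[words.idxOf w]'(h ▸ hlt) := by congr 1
    _ = w := h2

-- inner loop of A: processing term t (sitting right after `done` in words)
theorem pvInner (words done rest : List String) (t : String)
    (hw : words = done ++ t :: rest)
    (hpre : ∀ t ∈ words, ∀ w ∈ words, ∀ u ∈ words, ∀ v ∈ words,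
      t ++ "-" ++ w = u ++ "-" ++ v → t = u ∧ w = v) :
    ∀ (suffix pre : List String), words = pre ++ suffix →
      suffix.foldl
        (fun acc wi =>
          if t ≠ wi then
            if wi ++ "-" ++ t ∈ acc then acc else acc ++ [t ++ "-" ++ wi]
          else acc)
        (pvOut words done ++ (pre.filter (pvCond words t)).map (fun w => t ++ "-" ++ w))
      = pvOut words done ++ (words.filter (pvCond words t)).map (fun w => t ++ "-" ++ w) := by
  subst hw
  have htmem : t ∈ done ++ t :: rest := List.mem_append_right _ List.mem_cons_self
  have hdone : ∀ s ∈ done, s ∈ done ++ t :: rest := fun s hs => List.mem_append_left _ hs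
  have hIdxT : (done ++ t :: rest).idxOf t ≤ done.length := by
    rw [List.idxOf_append]
    split_ifs with h
    · exact le_of_lt (List.idxOf_lt_length_of_mem h)
    · simp
  intro suffix
  induction suffix with
  | nil =>
    intro pre hpw
    have : pre = done ++ t :: rest := by simpa using hpw.symm
    rw [this]
    rfl
  | cons w suffix ih =>
    intro pre hpw
    have hwmem : w ∈ (done ++ t :: rest) := hpw ▸ List.mem_append_right _ List.mem_cons_self
    rw [List.foldl_cons]
    have hstep :
        (if t ≠ w then
          if w ++ "-" ++ t ∈ pvOut (done ++ t :: rest) done ++ (pre.filter (pvCond (done ++ t :: rest) t)).map (fun w => t ++ "-" ++ w)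
          then pvOut (done ++ t :: rest) done ++ (pre.filter (pvCond (done ++ t :: rest) t)).map (fun w => t ++ "-" ++ w)
          else (pvOut (done ++ t :: rest) done ++ (pre.filter (pvCond (done ++ t :: rest) t)).map (fun w => t ++ "-" ++ w)) ++ [t ++ "-" ++ w]
         else pvOut (done ++ t :: rest) done ++ (pre.filter (pvCond (done ++ t :: rest) t)).map (fun w => t ++ "-" ++ w))
        = pvOut (done ++ t :: rest) done ++ ((pre ++ [w]).filter (pvCond (done ++ t :: rest) t)).map (fun w => t ++ "-" ++ w) := by
      by_cases hne : t = w
      · subst hne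
        rw [if_neg (by simp), List.filter_append]
        simp [pvCond]
      · rw [if_pos hne]
        have hmem : (w ++ "-" ++ t ∈ pvOut (done ++ t :: rest) done ++ (pre.filter (pvCond (done ++ t :: rest) t)).map
            (fun w => t ++ "-" ++ w)) ↔ (done ++ t :: rest).idxOf w < (done ++ t :: rest).idxOf t := by
          rw [List.mem_append]
          constructor
          · rintro (h | h)
            · have := (pvMem_out (done ++ t :: rest) done w t hpre hwmem htmem hdone).mp h
              obtain ⟨hwdone, -, hc⟩ := this
              unfold pvCond at hc
              simp only [Bool.and_eq_true, decide_eq_true_eq] at hc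
              exact hc.2
            · exfalso
              simp only [List.mem_map, List.mem_filter] at h
              obtain ⟨w', ⟨hw'pre, -⟩, henc⟩ := h
              have hw'mem : w' ∈ done ++ t :: rest := hpw ▸ List.mem_append_left _ hw'pre
              exact hne (hpre t htmem w' hw'mem w hwmem t htmem henc).1
          · intro hlt
            left
            apply (pvMem_out (done ++ t :: rest) done w t hpre hwmem htmem hdone).mpr
            have hwlt : (done ++ t :: rest).idxOf w < done.length := lt_of_lt_of_le hlt hIdxT
            have hwin : w ∈ done := by
              have hget := List.getElem_idxOf (x := w) (xs := done ++ t :: rest)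
                (List.idxOf_lt_length_of_mem hwmem)
              rw [List.getElem_append_left hwlt] at hget
              exact hget ▸ List.getElem_mem hwlt
            refine ⟨hwin, htmem, ?_⟩
            unfold pvCond
            simp [Ne.symm hne, hlt]
          -- done
        by_cases hlt : (done ++ t :: rest).idxOf w < (done ++ t :: rest).idxOf t
        · rw [if_pos (hmem.mpr hlt), List.filter_append]
          have : pvCond (done ++ t :: rest) t w = false := by
            unfold pvCond
            simp only [Bool.and_eq_false_iff, decide_eq_false_iff_not]
            right; omega
          simp [this]
        · rw [if_neg (fun h => hlt (hmem.mp h)), List.filter_append]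
          have hc : pvCond (done ++ t :: rest) t w = true := by
            unfold pvCond
            have := pvIdxOf_ne (done ++ t :: rest) t w htmem hwmem hne
            simp only [Bool.and_eq_true, bne_iff_ne, ne_eq, decide_eq_true_eq]
            exact ⟨hne, by omega⟩
          simp [hc, List.append_assoc]
    rw [hstep]
    exact ih (pre ++ [w]) (by rw [hpw, List.append_assoc]; rfl)

-- outer loop of A
theorem pvOuter (words : List String)
    (hpre : ∀ t ∈ words, ∀ w ∈ words, ∀ u ∈ words, ∀ v ∈ words,
      t ++ "-" ++ w = u ++ "-" ++ v → t = u ∧ w = v) :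
    ∀ (rest done : List String), words = done ++ rest →
      rest.foldl
        (fun all_combs term =>
          words.foldl
            (fun acc wi =>
              if term ≠ wi then
                if wi ++ "-" ++ term ∈ acc then acc else acc ++ [term ++ "-" ++ wi]
              else acc)
            all_combs)
        (pvOut words done)
      = pvOut words words := by
  intro rest
  induction rest with
  | nil =>
    intro done h
    have : done = words := by simpa using h.symm
    rw [this]
    rfl
  | cons t rest ih =>
    intro done h
    rw [List.foldl_cons]
    have hinner := pvInner words done rest t h hpre words [] (by simp)
    simp only [List.filter_nil, List.map_nil, List.append_nil] at hinner
    rw [hinner]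
    have hout : pvOut words done ++ (words.filter (pvCond words t)).map (fun w => t ++ "-" ++ w)
        = pvOut words (done ++ [t]) := by
      unfold pvOut
      rw [List.flatMap_append]
      simp
    rw [hout]
    exact ih (done ++ [t]) (by rw [h, List.append_assoc]; rfl)

-- ===== VERDICT (by name: the statement is the Claim_ definition above) =====
theorem createAllComb_spec : Claim_equal_createAllComb := by
  intro words _ hpre
  unfold Spec_createAllComb createAllComb
  rw [pvAlt_eq_out]
  have hconv : (fun (all_combs : List String) (term : String) =>
      (PySem.List.pyRange 0 (words.length : Int) 1).foldl
        (fun acc i =>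
          let wi := PySem.List.pyGetD words i ""
          if term ≠ wi then
            let combination := term ++ "-" ++ wi
            let combination_inv := wi ++ "-" ++ term
            if combination_inv ∈ acc then acc else acc ++ [combination]
          else acc)
        all_combs)
      = (fun (all_combs : List String) (term : String) =>
          words.foldl
            (fun acc wi =>
              if term ≠ wi then
                if wi ++ "-" ++ term ∈ acc then acc else acc ++ [term ++ "-" ++ wi]
              else acc)
            all_combs) := by
    funext all_combs term
    exact PySem.List.foldl_pyRange_zero_pyGetD' words ""
      (fun acc wi =>
        if term ≠ wi then
          if wi ++ "-" ++ term ∈ acc then acc else acc ++ [term ++ "-" ++ wi]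
        else acc) all_combs
  rw [hconv]
  have hinit : ([] : List String) = pvOut words [] := by simp [pvOut]
  rw [hinit]
  exact pvOuter words hpre words [] (by simp)
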